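-- pv_equiv track=rewrite | github.com/posl/comment_recommendation | script/mod_gen/1_time/en/238_C/4.py | f
-- ===== SOURCE A (Python) =====
-- def f(n):
--     if n==0:
--         return 0
--     if n<10:
--         return sum(range(1,n+1))
--     d=len(str(n))
--     ans=0
--     for i in range(1,d):
--         ans+=45*10**(i-1)*i
--     ans+=f(n%10**(d-1))
--     ans+=sum(range(1,n//10**(d-1)+1))*d
--     return ans
-- ===== SOURCE B (Python) =====
-- def f(n):
--     if n == 0:
--         return 0
--     ans = 0
--     while n >= 10:
--         d = len(str(n))
--         m = d - 1
--         p = 10 ** m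
--         ans += 45 * (m * 10 ** (m + 1) - (m + 1) * 10 ** m + 1) // 81
--         q = n // p
--         ans += q * (q + 1) // 2 * d
--         n %= p
--     if n > 0:
--         ans += n * (n + 1) // 2
--     return ans
-- ===== Notes on version B (the rewrite author's own statement) =====
-- stated objective: alternative
-- what changed: A's top-down recursion on n % 10**(d-1) is replaced by an iterative while-loop that peels the most-significant block each pass, and both inner sum(range(...)) aggregations are replaced by closed-form formulas (triangular numbers and 45*sum i*10^(i-1) = 45*(m*10^(m+1)-(m+1)*10^m+1)/81).
import Mathlib
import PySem

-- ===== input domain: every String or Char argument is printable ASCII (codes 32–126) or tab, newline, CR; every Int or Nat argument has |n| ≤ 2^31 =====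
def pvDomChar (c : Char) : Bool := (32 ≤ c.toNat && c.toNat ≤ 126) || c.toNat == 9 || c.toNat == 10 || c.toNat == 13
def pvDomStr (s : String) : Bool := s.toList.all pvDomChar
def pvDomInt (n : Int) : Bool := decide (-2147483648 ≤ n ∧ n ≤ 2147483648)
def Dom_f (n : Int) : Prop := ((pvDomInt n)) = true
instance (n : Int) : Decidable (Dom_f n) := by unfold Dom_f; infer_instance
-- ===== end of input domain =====

-- B replaces A's recursion by an iterative most-significant-block loop and the two
-- sum(range(...)) aggregations by closed-form formulas (objective: alternative).

-- ===== PORT A =====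
-- Python A recurses on n % 10**(d-1); ported with a fuel guard.  The recursion depth is
-- at most the digit count of n, so fuel n.toNat + 1 always suffices on inputs n ≥ 10.
-- Exponents: 10 ** (i-1) and 10 ** (d-1) have nonnegative exponents in Python here
-- (i ≥ 1 ranges over range(1,d); d = len(str(n)) ≥ 1), so ·.toNat is exact.
def fAux : Nat → Int → Int
  | 0, _ => 0
  | fuel+1, n =>
    if n = 0 then 0
    else if n < 10 then (PySem.List.pyRange 1 (n+1) 1).sum
    else
      let d : Int := PySem.Str.len (PySem.Int.toStr n)
      let ans : Int := (PySem.List.pyRange 1 d 1).foldl (fun ans i => ans + 45 * 10 ^ (i-1).toNat * i) 0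
      let ans := ans + fAux fuel (PySem.Int.mod n (10 ^ (d-1).toNat))
      let ans := ans + (PySem.List.pyRange 1 (PySem.Int.floordiv n (10 ^ (d-1).toNat) + 1) 1).sum * d
      ans

def f (n : Int) : Int := fAux (n.toNat + 1) n

-- ===== PORT B =====
-- Source B's while loop, ported with the same fuel guard (iterations ≤ digit count ≤ n.toNat).
def fAltLoop : Nat → Int → Int → Int
  | 0, _, ans => ans
  | fuel+1, n, ans =>
    if 10 ≤ n then
      let d : Int := PySem.Str.len (PySem.Int.toStr n)
      let m := d - 1
      let p : Int := 10 ^ m.toNat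
      let ans := ans + PySem.Int.floordiv (45 * (m * 10 ^ (m+1).toNat - (m+1) * 10 ^ m.toNat + 1)) 81
      let q := PySem.Int.floordiv n p
      let ans := ans + PySem.Int.floordiv (q * (q+1)) 2 * d
      fAltLoop fuel (PySem.Int.mod n p) ans
    else ans + (if 0 < n then PySem.Int.floordiv (n * (n+1)) 2 else 0)

def f_alt (n : Int) : Int :=
  if n = 0 then 0 else fAltLoop (n.toNat + 1) n 0

-- ===== PRECONDITION & SPEC =====
def Spec_f (n : Int) (out : Int) : Prop := out = f_alt n
instance (n : Int) (out : Int) : Decidable (Spec_f n out) := by unfold Spec_f; infer_instance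

-- ===== CLAIM (what is proved, stated in full; the proofs are below) =====
def Claim_equal_f : Prop := ∀ (n : Int), Dom_f n → Spec_f n (f n)

-- ===== LEMMAS AND PROOFS =====

-- sum(range(1, q+1)) = q*(q+1)//2 for 0 ≤ q
lemma tri_nat : ∀ (k : Nat), 2 * (PySem.List.pyRange 1 ((k:Int)+1) 1).sum = (k:Int)*((k:Int)+1) := by
  intro k
  induction k with
  | zero => simp [PySem.List.pyRange_one_eq_nil]
  | succ k ih =>
    rw [show ((k+1:Nat):Int)+1 = ((k:Int)+1)+1 by push_cast; ring,
        PySem.List.pyRange_one_succ_right (by omega)]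
    simp only [List.sum_append, List.sum_cons, List.sum_nil]
    rw [mul_add, ih]
    push_cast
    ring

lemma tri_closed (q : Int) (hq : 0 ≤ q) :
    (PySem.List.pyRange 1 (q+1) 1).sum = PySem.Int.floordiv (q*(q+1)) 2 := by
  rw [PySem.Int.floordiv_eq_ediv_of_pos (by norm_num)]
  obtain ⟨k, rfl⟩ := Int.eq_ofNat_of_zero_le hq
  rw [← tri_nat k, Int.mul_ediv_cancel_left _ (by norm_num)]

-- the level sum 45*sum_{i=1}^{m} i*10^(i-1), closed form, Nat case
lemma level_nat : ∀ (k : Nat),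
    81 * ((PySem.List.pyRange 1 ((k:Int)+1) 1).foldl (fun ans i => ans + 45 * 10 ^ (i-1).toNat * i) 0)
      = 45 * ((k:Int) * 10 ^ (k+1) - ((k:Int)+1) * 10 ^ k + 1) := by
  intro k
  induction k with
  | zero => simp [PySem.List.pyRange_one_eq_nil]
  | succ k ih =>
    rw [show ((k+1:Nat):Int)+1 = ((k:Int)+1)+1 by push_cast; ring,
        PySem.List.pyRange_one_succ_right (by omega)]
    rw [List.foldl_append]
    simp only [List.foldl_cons, List.foldl_nil]
    have he : (((k:Int)+1)-1).toNat = k := by omega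
    rw [mul_add, ih, he]
    push_cast
    ring

lemma level_closed (m : Int) :
    (PySem.List.pyRange 1 (m+1) 1).foldl (fun ans i => ans + 45 * 10 ^ (i-1).toNat * i) 0
      = PySem.Int.floordiv (45 * (m * 10 ^ (m+1).toNat - (m+1) * 10 ^ m.toNat + 1)) 81 := by
  rw [PySem.Int.floordiv_eq_ediv_of_pos (by norm_num)]
  by_cases hm : 0 ≤ m
  · obtain ⟨k, rfl⟩ := Int.eq_ofNat_of_zero_le hm
    have h1 : (((k:Int))+1).toNat = k+1 := by omega
    have h2 : ((k:Int)).toNat = k := by omega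
    rw [h1, h2, ← level_nat k, Int.mul_ediv_cancel_left _ (by norm_num)]
  · have h1 : (m+1).toNat = 0 := by omega
    have h2 : m.toNat = 0 := by omega
    rw [h1, h2, PySem.List.pyRange_one_eq_nil (by omega)]
    simp

-- lockstep: B's accumulator loop computes ans + A's recursion, at every fuel
lemma loop_eq : ∀ (fuel : Nat) (n ans : Int), fAltLoop fuel n ans = ans + fAux fuel n := by
  intro fuel
  induction fuel with
  | zero => intro n ans; simp [fAltLoop, fAux]
  | succ fuel ih =>
    intro n ans
    by_cases h10 : 10 ≤ n
    · have hn0 : ¬ n = 0 := by omega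
      have hn10 : ¬ n < 10 := by omega
      simp only [fAltLoop, fAux, if_pos h10, if_neg hn0, if_neg hn10]
      rw [ih]
      set d : Int := PySem.Str.len (PySem.Int.toStr n) with hd
      have hq : 0 ≤ PySem.Int.floordiv n (10 ^ (d-1).toNat) := by
        rw [PySem.Int.floordiv_eq_ediv_of_pos (by positivity)]
        exact Int.ediv_nonneg (by omega) (by positivity)
      rw [tri_closed _ hq]
      have hl := level_closed (d-1)
      rw [show d - 1 + 1 = d by ring] at hl ⊢
      rw [← hl]
      ring
    · simp only [fAltLoop, fAux, if_neg h10]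
      by_cases hn0 : n = 0
      · subst hn0; simp
      · simp only [if_neg hn0]
        have hn10 : n < 10 := by omega
        simp only [if_pos hn10]
        by_cases hp : 0 < n
        · rw [if_pos hp, tri_closed n (by omega)]
        · rw [if_neg hp, PySem.List.pyRange_one_eq_nil (by omega)]
          simp

-- ===== VERDICT (by name: the statement is the Claim_ definition above) =====
theorem f_spec : Claim_equal_f := by
  intro n _
  unfold Spec_f f f_alt
  by_cases hn0 : n = 0
  · subst hn0; simp [fAux]
  · rw [if_neg hn0, loop_eq]; ring
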